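-- pv_equiv track=rewrite | github.com/AlirezasDev/Basics-Of-Programming | Codes/Filtering.py | remaining_statues
-- ===== SOURCE A (Python) =====
-- def remaining_statues(heights, index, max_height):
--     if index < 0:
--         return []
--
--     current_height = heights[index]
--
--     if current_height > max_height:
--         return [current_height] + remaining_statues(heights, index - 1, current_height)
--     else:
--         return remaining_statues(heights, index - 1, max_height)
-- ===== SOURCE B (Python) =====
-- def remaining_statues(heights, index, max_height):
--     if index < 0:
--         return []
--     out = []
--     mx = max_height
--     for h in reversed(heights[:index + 1]):
--         if h > mx:
--             out.append(h)
--             mx = h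
--     return out
-- ===== Notes on version B (the rewrite author's own statement) =====
-- stated objective: alternative
-- what changed: Replaced the recursive prepend-and-recurse index scan with an iterative pass over the reversed prefix slice heights[:index+1] that appends to an accumulator (no recursion depth, no per-step list concatenation).
import Mathlib
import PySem

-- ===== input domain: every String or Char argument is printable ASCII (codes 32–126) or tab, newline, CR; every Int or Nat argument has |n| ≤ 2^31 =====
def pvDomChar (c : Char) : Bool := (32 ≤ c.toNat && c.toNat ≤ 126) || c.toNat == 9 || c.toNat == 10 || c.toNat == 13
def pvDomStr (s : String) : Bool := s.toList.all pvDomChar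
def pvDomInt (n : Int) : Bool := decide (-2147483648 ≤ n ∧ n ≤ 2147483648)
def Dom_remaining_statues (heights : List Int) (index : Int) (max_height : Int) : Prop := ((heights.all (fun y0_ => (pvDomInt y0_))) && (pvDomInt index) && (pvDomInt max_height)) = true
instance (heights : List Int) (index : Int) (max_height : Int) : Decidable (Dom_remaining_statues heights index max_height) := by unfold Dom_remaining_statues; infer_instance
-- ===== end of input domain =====

-- B replaces A's recursion on a moving index with one iterative pass over the reversed prefix slice, appending to an accumulator.

-- ===== PORT A =====
-- literal port of A's recursion; the Nat fuel (index+1 at entry) only guarantees termination and is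
-- never exhausted while index ≥ 0; pyGet? = none (IndexError) is excluded by Pre_
def remainingARec (heights : List Int) (fuel : Nat) (index : Int) (max_height : Int) : List Int :=
  match fuel with
  | 0 => []
  | f + 1 =>
    if index < 0 then []
    else
      match PySem.List.pyGet? heights index with
      | none => []  -- IndexError in Python; outside Pre_
      | some current_height =>
        if current_height > max_height then
          current_height :: remainingARec heights f (index - 1) current_height
        else
          remainingARec heights f (index - 1) max_height

def remaining_statues (heights : List Int) (index : Int) (max_height : Int) : List Int :=
  remainingARec heights (index + 1).toNat index max_height

-- ===== PORT B =====
-- Source B: one for-loop over reversed(heights[:index+1]) carrying (out, mx); append = out ++ [h]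
def remaining_statues_alt (heights : List Int) (index : Int) (max_height : Int) : List Int :=
  if index < 0 then []
  else
    (((PySem.List.slice heights none (some (index + 1))).reverse).foldl
      (fun (st : List Int × Int) h => if h > st.2 then (st.1 ++ [h], h) else st)
      ([], max_height)).1

-- ===== PRECONDITION & SPEC =====
-- Pre_ excludes only the inputs where heights[index] raises IndexError (index ≥ len(heights)); index < 0 is fine (A returns []).
def Pre_remaining_statues (heights : List Int) (index : Int) (max_height : Int) : Prop :=
  index < heights.length
instance (heights : List Int) (index : Int) (max_height : Int) : Decidable (Pre_remaining_statues heights index max_height) := by unfold Pre_remaining_statues; infer_instance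

def pvWitness_remaining_statues : List Int × Int × Int := ([3, 1, 4, 2], 3, 0)

def Spec_remaining_statues (heights : List Int) (index : Int) (max_height : Int) (out : List Int) : Prop := out = remaining_statues_alt heights index max_height
instance (heights : List Int) (index : Int) (max_height : Int) (out : List Int) : Decidable (Spec_remaining_statues heights index max_height out) := by unfold Spec_remaining_statues; infer_instance

-- ===== CLAIM (what is proved, stated in full; the proofs are below) =====
def Claim_equal_remaining_statues : Prop := ∀ (heights : List Int) (index : Int) (max_height : Int), Dom_remaining_statues heights index max_height → Pre_remaining_statues heights index max_height → Spec_remaining_statues heights index max_height (remaining_statues heights index max_height)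

-- ===== LEMMAS AND PROOFS =====
-- B's fold over the reversed n-prefix equals A's recursion started at index n-1 with fuel n.
lemma fold_take_eq (heights : List Int) : ∀ (n : Nat), n ≤ heights.length → ∀ (acc : List Int) (mx : Int),
    (((heights.take n).reverse).foldl
      (fun (st : List Int × Int) h => if h > st.2 then (st.1 ++ [h], h) else st)
      (acc, mx)).1 = acc ++ remainingARec heights n ((n : Int) - 1) mx := by
  intro n
  induction n with
  | zero => intro _ acc mx; simp [remainingARec]
  | succ n ih =>
    intro hn acc mx
    have hlt : n < heights.length := by omega
    rw [List.take_add_one, List.getElem?_eq_getElem hlt]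
    simp only [Option.toList, List.reverse_append, List.reverse_cons, List.reverse_nil,
      List.nil_append, List.singleton_append, List.foldl_cons]
    have e1 : ((n + 1 : Nat) : Int) - 1 = (n : Int) := by push_cast; ring
    rw [remainingARec]
    simp only [e1, show ¬ ((n : Int) < 0) from by omega, if_false,
      PySem.List.pyGet?_natCast, List.getElem?_eq_getElem hlt]
    by_cases hc : heights[n] > mx
    · rw [if_pos hc, if_pos hc, ih (by omega) (acc ++ [heights[n]]) heights[n]]
      simp
    · rw [if_neg hc, if_neg hc, ih (by omega) acc mx]

lemma slice_prefix (heights : List Int) (index : Int) (h : 0 ≤ index) :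
    PySem.List.slice heights none (some (index + 1)) = heights.take (index + 1).toNat :=
  PySem.List.slice_to heights (show (0:Int) ≤ index + 1 by omega)

-- ===== VERDICT (by name: the statement is the Claim_ definition above) =====
theorem remaining_statues_spec : Claim_equal_remaining_statues := by
  intro heights index max_height _ hpre
  unfold Pre_remaining_statues at hpre
  unfold Spec_remaining_statues remaining_statues_alt remaining_statues
  by_cases hneg : index < 0
  · have : (index + 1).toNat = 0 := by omega
    simp [hneg, this, remainingARec]
  · rw [if_neg hneg, slice_prefix heights index (by omega),
      fold_take_eq heights (index + 1).toNat (by omega) [] max_height]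
    have : ((index + 1).toNat : Int) - 1 = index := by omega
    rw [this, List.nil_append]
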